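-- pv_equiv track=rewrite | github.com/cnpem/annotat3d | backend/sscAnnotat3D/modules/superpixel_segmentation_module.py | _annotations_coords_per_slices
-- ===== SOURCE A (Python) =====
-- def _annotations_coords_per_slices(annotations):
--     slice_coords = {}
--     for coord, (label, mk_id) in annotations.items():
--         z = coord[0]
--         if z not in slice_coords:
--             slice_coords[z] = {coord}
--         else:
--             slice_coords[z].add(coord)
--     return slice_coords
-- ===== SOURCE B (Python) =====
-- def _annotations_coords_per_slices(annotations):
--     coords = list(annotations)
--     zs = dict.fromkeys(c[0] for c in coords)
--     return {z: {c for c in coords if c[0] == z} for z in zs}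
-- ===== Notes on version B (the rewrite author's own statement) =====
-- stated objective: simpler
-- what changed: Replaces the incremental check-then-insert dict-of-sets accumulation with two declarative passes: dict.fromkeys collects the distinct z indices in first-occurrence order, then one comprehension builds each slice's coord set by filtering.
import Mathlib
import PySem

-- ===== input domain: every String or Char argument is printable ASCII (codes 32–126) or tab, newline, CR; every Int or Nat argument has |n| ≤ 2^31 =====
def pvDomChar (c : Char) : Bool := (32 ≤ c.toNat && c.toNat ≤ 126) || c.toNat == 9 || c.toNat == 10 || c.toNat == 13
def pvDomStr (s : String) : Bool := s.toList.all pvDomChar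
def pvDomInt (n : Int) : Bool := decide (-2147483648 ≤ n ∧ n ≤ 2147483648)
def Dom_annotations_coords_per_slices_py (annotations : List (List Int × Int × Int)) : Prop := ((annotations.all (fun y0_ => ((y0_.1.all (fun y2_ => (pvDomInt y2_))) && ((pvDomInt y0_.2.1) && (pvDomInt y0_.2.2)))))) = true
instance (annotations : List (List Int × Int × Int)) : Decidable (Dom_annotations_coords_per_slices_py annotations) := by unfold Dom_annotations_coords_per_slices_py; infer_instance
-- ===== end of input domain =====

-- B groups by z with two declarative passes (dedup of the z's, then a filter per z) instead of
-- A's incremental check-then-insert dict-of-sets; same return value, no speed claim.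

-- coord[0] as Python computes it (total form; Pre_ guarantees coord ≠ [], where the getD default is never used)
def pvZ (coord : List Int) : Int := (PySem.List.pyGet? coord 0).getD 0

-- ===== PORT A =====
def annotations_coords_per_slices_py (annotations : List (List Int × Int × Int)) : List (Int × List (List Int)) :=
  (annotations.foldl
    (fun (d : PySem.Dict Int (PySem.Set (List Int))) it =>
      let coord := it.1
      let z := pvZ coord
      if d.contains z = false then d.insert z (PySem.Set.ofList [coord])
      else d.modify z PySem.Set.empty (fun s => s.add coord))
    PySem.Dict.empty).items

-- ===== PORT B =====
def annotations_coords_per_slices_py_alt (annotations : List (List Int × Int × Int)) : List (Int × List (List Int)) :=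
  let coords := annotations.map (fun it => it.1)
  let zs := PySem.List.dedup (coords.map pvZ)
  zs.map (fun z => (z, PySem.Set.ofList (coords.filter (fun c => pvZ c == z))))

-- ===== PRECONDITION & SPEC =====
-- Pre_ excludes exactly the inputs on which A raises IndexError: an empty coord tuple (coord[0]).
def Pre_annotations_coords_per_slices_py (annotations : List (List Int × Int × Int)) : Prop :=
  ∀ it ∈ annotations, it.1 ≠ []
instance (annotations : List (List Int × Int × Int)) : Decidable (Pre_annotations_coords_per_slices_py annotations) := by unfold Pre_annotations_coords_per_slices_py; infer_instance

def pvWitness_annotations_coords_per_slices_py : (List (List Int × Int × Int)) :=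
  [([0, 1, 2], 1, 7), ([0, 2, 2], 1, 8), ([1, 0, 0], 2, 9)]

def Spec_annotations_coords_per_slices_py (annotations : List (List Int × Int × Int)) (out : List (Int × List (List Int))) : Prop := out = annotations_coords_per_slices_py_alt annotations
instance (annotations : List (List Int × Int × Int)) (out : List (Int × List (List Int))) : Decidable (Spec_annotations_coords_per_slices_py annotations out) := by unfold Spec_annotations_coords_per_slices_py; infer_instance

-- ===== CLAIM (what is proved, stated in full; the proofs are below) =====
def Claim_equal_annotations_coords_per_slices_py : Prop := ∀ (annotations : List (List Int × Int × Int)), Dom_annotations_coords_per_slices_py annotations → Pre_annotations_coords_per_slices_py annotations → Spec_annotations_coords_per_slices_py annotations (annotations_coords_per_slices_py annotations)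

-- ===== LEMMAS AND PROOFS =====

-- A's loop body equals a single Dict.modify (the two branches coincide with modify's two cases)
lemma pv_step_eq_modify (d : PySem.Dict Int (PySem.Set (List Int))) (it : List Int × Int × Int) :
    (if d.contains (pvZ it.1) = false then d.insert (pvZ it.1) (PySem.Set.ofList [it.1])
     else d.modify (pvZ it.1) PySem.Set.empty (fun s => s.add it.1))
    = d.modify (pvZ it.1) PySem.Set.empty (fun s => s.add it.1) := by
  by_cases h : d.contains (pvZ it.1) = true
  · simp [h]
  · simp only [Bool.not_eq_true] at h
    simp [pysem, h, PySem.Dict.modify, PySem.Set.ofList]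

-- the getD of the grouping fold is the update of the filtered coords
lemma pv_getD_fold (l : List (List Int × Int × Int)) (d : PySem.Dict Int (PySem.Set (List Int))) (z : Int) :
    (l.foldl (fun d it => d.modify (pvZ it.1) PySem.Set.empty (fun s => s.add it.1)) d).getD z PySem.Set.empty
    = PySem.Set.update (d.getD z PySem.Set.empty) ((l.filter (fun it => pvZ it.1 == z)).map (fun it => it.1)) := by
  induction l generalizing d with
  | nil => simp [PySem.Set.update]
  | cons it rest ih =>
    simp only [List.foldl_cons, List.filter_cons]
    by_cases h : pvZ it.1 = z
    · rw [ih, PySem.Dict.getD_modify]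
      simp [h, PySem.Set.update]
    · have hb : (pvZ it.1 == z) = false := by simp [h]
      rw [ih, PySem.Dict.getD_modify]
      simp [hb, Ne.symm h]

-- ===== VERDICT (by name: the statement is the Claim_ definition above) =====
theorem annotations_coords_per_slices_py_spec : Claim_equal_annotations_coords_per_slices_py := by
  intro l _ _
  unfold Spec_annotations_coords_per_slices_py
  unfold annotations_coords_per_slices_py annotations_coords_per_slices_py_alt
  have hfold :
      (l.foldl (fun (d : PySem.Dict Int (PySem.Set (List Int))) it =>
          let coord := it.1
          let z := pvZ coord
          if d.contains z = false then d.insert z (PySem.Set.ofList [coord])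
          else d.modify z PySem.Set.empty (fun s => s.add coord)) PySem.Dict.empty)
      = l.foldl (fun d it => d.modify (pvZ it.1) PySem.Set.empty (fun s => s.add it.1)) PySem.Dict.empty := by
    congr 1
    funext d it
    exact pv_step_eq_modify d it
  rw [hfold]
  set D := l.foldl (fun d it => d.modify (pvZ it.1) PySem.Set.empty (fun s => s.add it.1)) PySem.Dict.empty with hD
  have hnd : D.keys.Nodup := by
    rw [hD]
    exact PySem.Dict.nodup_keys_foldl_modify_key l (fun it => pvZ it.1) PySem.Set.empty
      (fun _ it s => s.add it.1) PySem.Dict.empty (by simp [pysem])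
  have hkeys : D.keys = PySem.List.dedup ((l.map (fun it => it.1)).map pvZ) := by
    rw [hD, PySem.Dict.keys_foldl_modify_key]
    simp [PySem.List.dedup, PySem.Set.update, PySem.Set.ofList, List.map_map, Function.comp_def]
  have hitems := PySem.Dict.items_eq_map_keys D hnd PySem.Set.empty
  rw [hitems, hkeys]
  apply List.map_congr_left
  intro z _
  congr 1
  rw [hD, pv_getD_fold, List.filter_map]
  simp [PySem.Set.update, PySem.Set.ofList, PySem.Dict.getD_empty, Function.comp_def]
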